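-- pv_equiv track=rewrite | github.com/bigear88/DmAVID | scripts/30_evmbench_smart_preprocess.py | judge_detection
-- ===== SOURCE A (Python) =====
-- def judge_detection(found_vulns, gold_vulns):
--     """Simple matching: check if found vulns match gold vulns by keyword overlap."""
--     detected = 0
--     for gv in gold_vulns:
--         gold_title = gv.get("title", "").lower()
--         gold_id = gv.get("id", "").lower()
--         for fv in found_vulns:
--             found_title = fv.get("title", "").lower()
--             found_summary = fv.get("summary", "").lower()
--             # Check keyword overlap
--             gold_words = set(gold_title.split())
--             found_words = set(found_title.split()) | set(found_summary.split())
--             overlap = len(gold_words & found_words)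
--             if overlap >= 2 or gold_id in found_summary:
--                 detected += 1
--                 break
--     return detected
-- ===== SOURCE B (Python) =====
-- def judge_detection(found_vulns, gold_vulns):
--     """Inverted word index built once over found vulns; gold matching by postings
--     accumulation instead of per-pair set intersection."""
--     index = {}
--     summaries = []
--     for i, fv in enumerate(found_vulns):
--         summary = fv.get("summary", "").lower()
--         words = set(fv.get("title", "").lower().split()) | set(summary.split())
--         for w in words:
--             index.setdefault(w, []).append(i)
--         summaries.append(summary)
--     detected = 0
--     for gv in gold_vulns:
--         gold_id = gv.get("id", "").lower()
--         counts = {}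
--         for w in set(gv.get("title", "").lower().split()):
--             for i in index.get(w, []):
--                 counts[i] = counts.get(i, 0) + 1
--         if any(c >= 2 for c in counts.values()) or any(gold_id in s for s in summaries):
--             detected += 1
--     return detected
-- ===== Notes on version B (the rewrite author's own statement) =====
-- stated objective: alternative
-- what changed: B builds an inverted word index (word -> found indices) and the summaries list in one pass over found_vulns, then judges each gold vuln by accumulating per-found-index postings counts, instead of A's per-(gold,found) tokenization and set intersection.
import Mathlib
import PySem

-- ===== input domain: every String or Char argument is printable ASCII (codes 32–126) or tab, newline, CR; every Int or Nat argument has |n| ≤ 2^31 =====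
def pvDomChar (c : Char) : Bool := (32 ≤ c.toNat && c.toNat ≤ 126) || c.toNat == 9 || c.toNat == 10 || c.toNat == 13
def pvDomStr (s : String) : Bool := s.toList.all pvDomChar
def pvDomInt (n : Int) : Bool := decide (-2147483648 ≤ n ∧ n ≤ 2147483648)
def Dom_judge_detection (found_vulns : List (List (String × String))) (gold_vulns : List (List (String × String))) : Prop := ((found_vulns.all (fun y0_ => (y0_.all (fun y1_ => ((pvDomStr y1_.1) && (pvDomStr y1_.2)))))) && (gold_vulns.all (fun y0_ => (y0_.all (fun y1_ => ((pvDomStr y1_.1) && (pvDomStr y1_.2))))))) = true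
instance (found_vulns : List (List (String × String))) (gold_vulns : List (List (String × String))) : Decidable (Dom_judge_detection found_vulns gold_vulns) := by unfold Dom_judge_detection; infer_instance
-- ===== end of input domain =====

-- B builds an inverted word index over found_vulns once and judges each gold vuln by
-- postings accumulation, instead of A's per-(gold,found) tokenization and set intersection (objective: alternative).

-- ===== PORT A =====
-- fv.get(key, dflt) on the association-list dict (first match)
def dget (d : List (String × String)) (k : String) (dflt : String) : String :=
  match d.find? (fun p => p.1 == k) with
  | some p => p.2
  | none => dflt

-- A's inner 'for fv in found_vulns: … break' loop
def innerA (gold_title gold_id : String) : List (List (String × String)) → Bool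
  | [] => false
  | fv :: rest =>
    let found_title := PySem.Str.lower (dget fv "title" "")
    let found_summary := PySem.Str.lower (dget fv "summary" "")
    let gold_words := PySem.Set.ofList (PySem.Str.split₀ gold_title)
    let found_words := PySem.Set.union (PySem.Set.ofList (PySem.Str.split₀ found_title))
                                       (PySem.Set.ofList (PySem.Str.split₀ found_summary))
    let overlap := PySem.Set.len (PySem.Set.inter gold_words found_words)
    if decide (2 ≤ overlap) || PySem.Str.isIn gold_id found_summary then true
    else innerA gold_title gold_id rest

def judge_detection (found_vulns : List (List (String × String))) (gold_vulns : List (List (String × String))) : Int :=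
  gold_vulns.foldl (fun detected gv =>
    let gold_title := PySem.Str.lower (dget gv "title" "")
    let gold_id := PySem.Str.lower (dget gv "id" "")
    if innerA gold_title gold_id found_vulns then detected + 1 else detected) 0

-- ===== PORT B =====
-- the first pass of Source B: (inverted index word -> list of found indices, summaries)
def pvBuild (found_vulns : List (List (String × String))) : PySem.Dict String (List Int) × List String :=
  (PySem.List.enumerate found_vulns 0).foldl
    (fun st p =>
      let summary := PySem.Str.lower (dget p.2 "summary" "")
      let words := PySem.Set.union (PySem.Set.ofList (PySem.Str.split₀ (PySem.Str.lower (dget p.2 "title" ""))))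
                                   (PySem.Str.split₀ summary)
      (words.foldl (fun d w => d.modify w [] (· ++ [p.1])) st.1, st.2 ++ [summary]))
    (PySem.Dict.empty, [])

def judge_detection_alt (found_vulns : List (List (String × String))) (gold_vulns : List (List (String × String))) : Int :=
  let index := (pvBuild found_vulns).1
  let summaries := (pvBuild found_vulns).2
  gold_vulns.foldl (fun detected gv =>
    let gold_id := PySem.Str.lower (dget gv "id" "")
    let counts := (PySem.Set.ofList (PySem.Str.split₀ (PySem.Str.lower (dget gv "title" "")))).foldl
      (fun c w => (index.getD w []).foldl (fun c i => c.modify i 0 (· + 1)) c) PySem.Dict.empty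
    if counts.values.any (fun c => decide ((2:Int) ≤ c)) || summaries.any (fun s => PySem.Str.isIn gold_id s)
    then detected + 1 else detected) 0

-- ===== PRECONDITION & SPEC =====
def Spec_judge_detection (found_vulns : List (List (String × String))) (gold_vulns : List (List (String × String))) (out : Int) : Prop := out = judge_detection_alt found_vulns gold_vulns
instance (found_vulns : List (List (String × String))) (gold_vulns : List (List (String × String))) (out : Int) : Decidable (Spec_judge_detection found_vulns gold_vulns out) := by unfold Spec_judge_detection; infer_instance

-- ===== CLAIM (what is proved, stated in full; the proofs are below) =====
def Claim_equal_judge_detection : Prop := ∀ (found_vulns : List (List (String × String))) (gold_vulns : List (List (String × String))), Dom_judge_detection found_vulns gold_vulns → Spec_judge_detection found_vulns gold_vulns (judge_detection found_vulns gold_vulns)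

-- ===== LEMMAS AND PROOFS =====

-- specification-level views of the two programs
def pvSumOf (fv : List (String × String)) : String := PySem.Str.lower (dget fv "summary" "")
def pvWordsOf (fv : List (String × String)) : PySem.Set String :=
  PySem.Set.union (PySem.Set.ofList (PySem.Str.split₀ (PySem.Str.lower (dget fv "title" ""))))
                  (PySem.Str.split₀ (pvSumOf fv))
def pvPostings (found_vulns : List (List (String × String))) (w : String) : List Int :=
  ((PySem.List.enumerate found_vulns 0).filter (fun p => (pvWordsOf p.2).contains w)).map (·.1)
def pvHits (found_vulns : List (List (String × String))) (gt : String) : List Int :=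
  (PySem.Set.ofList (PySem.Str.split₀ gt)).flatMap (pvPostings found_vulns)

lemma pvWordsOf_nodup (fv : List (String × String)) : (pvWordsOf fv).Nodup :=
  PySem.Set.nodup_union _ _ (PySem.Set.nodup_ofList _)

-- one found's inner word loop appends its index to exactly its words' postings
lemma getD_words_fold (ws : List String) (hws : ws.Nodup) (d : PySem.Dict String (List Int)) (i : Int) (w : String) :
    ((ws.foldl (fun d w' => d.modify w' [] (· ++ [i])) d).getD w []) =
      d.getD w [] ++ (if w ∈ ws then [i] else []) := by
  induction ws generalizing d with
  | nil => simp
  | cons a ws ih =>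
    obtain ⟨ha, hnd⟩ := List.nodup_cons.mp hws
    rw [List.foldl_cons, ih hnd]
    by_cases hw : w = a
    · subst hw
      rw [PySem.Dict.getD_modify_self]
      simp [ha]
    · rw [PySem.Dict.getD_modify_of_ne _ _ _ hw]
      simp [hw]

-- the build pass (generalized over start index and accumulator)
lemma build_fold_spec (fs : List (List (String × String))) :
    ∀ (s : Int) (st : PySem.Dict String (List Int) × List String),
    ((PySem.List.enumerate fs s).foldl
      (fun st p =>
        let summary := PySem.Str.lower (dget p.2 "summary" "")
        let words := PySem.Set.union (PySem.Set.ofList (PySem.Str.split₀ (PySem.Str.lower (dget p.2 "title" ""))))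
                                     (PySem.Str.split₀ summary)
        (words.foldl (fun d w => d.modify w [] (· ++ [p.1])) st.1, st.2 ++ [summary])) st) =
      ((PySem.List.enumerate fs s).foldl
        (fun d p => (pvWordsOf p.2).foldl (fun d w => d.modify w [] (· ++ [p.1])) d) st.1,
       st.2 ++ fs.map pvSumOf) := by
  induction fs with
  | nil => intro s st; simp [PySem.List.enumerate]
  | cons fv fs ih =>
    intro s st
    rw [PySem.List.enumerate_cons, List.foldl_cons, List.foldl_cons, ih]
    simp [pvWordsOf, pvSumOf]

lemma pvBuild_snd (found_vulns : List (List (String × String))) :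
    (pvBuild found_vulns).2 = found_vulns.map pvSumOf := by
  rw [pvBuild, build_fold_spec]
  simp

lemma getD_index_fold (fs : List (List (String × String))) :
    ∀ (s : Int) (d : PySem.Dict String (List Int)) (w : String),
    ((PySem.List.enumerate fs s).foldl
        (fun d p => (pvWordsOf p.2).foldl (fun d w => d.modify w [] (· ++ [p.1])) d) d).getD w [] =
      d.getD w [] ++ ((PySem.List.enumerate fs s).filter (fun p => (pvWordsOf p.2).contains w)).map (·.1) := by
  induction fs with
  | nil => intro s d w; simp [PySem.List.enumerate]
  | cons fv fs ih =>
    intro s d w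
    rw [PySem.List.enumerate_cons, List.foldl_cons, ih,
        getD_words_fold _ (pvWordsOf_nodup fv) d s w, List.filter_cons]
    by_cases hw : w ∈ pvWordsOf fv
    · simp [hw]
    · simp [hw]

-- the index's postings lists
lemma pvBuild_fst_getD (found_vulns : List (List (String × String))) (w : String) :
    (pvBuild found_vulns).1.getD w [] = pvPostings found_vulns w := by
  rw [pvBuild, build_fold_spec]
  simp [getD_index_fold, pvPostings]

-- nested foldl over per-word postings = foldl over the flattened hits list
lemma foldl_foldl_flatMap {a b g : Type} (gf : a -> List b) (f : g -> b -> g) :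
    ∀ (l : List a) (c : g), l.foldl (fun c x => (gf x).foldl f c) c = (l.flatMap gf).foldl f c := by
  intro l
  induction l with
  | nil => intro c; simp
  | cons x l ih => intro c; simp [List.foldl_append, ih]

-- in a fst-strictly-increasing pair list, filtered fsts count a member 0/1 times
lemma count_map_fst_filter {a : Type} (q : Int × a → Bool) :
    ∀ (l : List (Int × a)), l.Pairwise (fun p r => p.1 < r.1) →
      ∀ x ∈ l, ((l.filter q).map (·.1)).count x.1 = if q x then 1 else 0 := by
  intro l
  induction l with
  | nil => intro _ x hx; cases hx
  | cons p l ih =>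
    intro hpw x hx
    obtain ⟨ha, hl⟩ := List.pairwise_cons.mp hpw
    have hnotin : p.1 ∉ (l.filter q).map (·.1) := by
      intro hmem
      obtain ⟨r, hr, hfst⟩ := List.mem_map.mp hmem
      have := ha r (List.mem_of_mem_filter hr)
      omega
    rcases List.mem_cons.mp hx with hxa | hxl
    · subst hxa
      rw [List.filter_cons]
      by_cases hq : q x = true
      · rw [if_pos hq, List.map_cons, List.count_cons_self, List.count_eq_zero.mpr hnotin, if_pos hq]
      · rw [if_neg hq, List.count_eq_zero.mpr hnotin, if_neg hq]
    · have hax := ha x hxl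
      rw [List.filter_cons]
      by_cases hq : q p = true
      · rw [if_pos hq, List.map_cons, List.count_cons_of_ne (by omega : p.1 ≠ x.1), ih hl x hxl]
      · rw [if_neg hq, ih hl x hxl]

-- count of an existing index in the hits list = the keyword overlap of that found vuln
lemma count_hits (founds : List (List (String × String))) (p : Int × List (String × String))
    (hp : p ∈ PySem.List.enumerate founds 0) (ws : List String) :
    ((ws.flatMap (pvPostings founds)).count p.1) = ws.countP (fun w => (pvWordsOf p.2).contains w) := by
  induction ws with
  | nil => simp
  | cons w ws ih =>
    rw [List.flatMap_cons, List.count_append, List.countP_cons, ih]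
    have := count_map_fst_filter (fun r => (pvWordsOf r.2).contains w)
      (PySem.List.enumerate founds 0) (PySem.List.pairwise_lt_enumerate founds 0) p hp
    rw [pvPostings] at *
    rw [this]
    by_cases hq : (pvWordsOf p.2).contains w = true <;> simp [hq] <;> omega

lemma mem_postings (founds : List (List (String × String))) (w : String) (i : Int) :
    i ∈ pvPostings founds w ↔
      ∃ p ∈ PySem.List.enumerate founds 0, p.1 = i ∧ (pvWordsOf p.2).contains w := by
  simp only [pvPostings, List.mem_map, List.mem_filter]
  constructor
  · rintro ⟨p, ⟨hpE, hc⟩, hfst⟩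
    exact ⟨p, hpE, hfst, hc⟩
  · rintro ⟨p, hpE, hfst, hc⟩
    exact ⟨p, ⟨hpE, hc⟩, hfst⟩

-- the heart: "some accumulated count reaches 2" iff "some found vuln has overlap ≥ 2"
lemma key_iff (founds : List (List (String × String))) (gt : String) :
    (∃ i ∈ pvHits founds gt, (2:Int) ≤ ((pvHits founds gt).count i : Int)) ↔
      ∃ fv ∈ founds, (2:Int) ≤
        (((PySem.Set.ofList (PySem.Str.split₀ gt)).countP (fun w => (pvWordsOf fv).contains w) : Nat) : Int) := by
  constructor
  · rintro ⟨i, hi, hc⟩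
    obtain ⟨w, hwG, hip⟩ := List.mem_flatMap.mp hi
    obtain ⟨p, hpE, hfst, _⟩ := (mem_postings founds w i).mp hip
    obtain ⟨k, hk, hpk⟩ := (PySem.List.mem_enumerate_iff founds 0 p).mp hpE
    refine ⟨p.2, ?_, ?_⟩
    · rw [hpk]; exact List.getElem_mem hk
    · have hcnt := count_hits founds p hpE (PySem.Set.ofList (PySem.Str.split₀ gt))
      rw [hfst] at hcnt
      rw [pvHits] at hc
      rw [hcnt] at hc
      exact hc
  · rintro ⟨fv, hfv, hov⟩
    obtain ⟨k, hk, hfk⟩ := List.mem_iff_getElem.mp hfv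
    have hpE : ((0 + (k:Int), fv) : Int × List (String × String)) ∈ PySem.List.enumerate founds 0 := by
      rw [PySem.List.mem_enumerate_iff]
      exact ⟨k, hk, by rw [hfk]⟩
    have hcnt := count_hits founds (0 + (k:Int), fv) hpE (PySem.Set.ofList (PySem.Str.split₀ gt))
    have hov' : 2 ≤ (PySem.Set.ofList (PySem.Str.split₀ gt)).countP (fun w => (pvWordsOf fv).contains w) := by
      exact_mod_cast hov
    have hpos : 0 < (PySem.Set.ofList (PySem.Str.split₀ gt)).countP (fun w => (pvWordsOf fv).contains w) := by
      omega
    obtain ⟨w, hwG, hcont⟩ := List.countP_pos_iff.mp hpos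
    refine ⟨0 + (k:Int), ?_, ?_⟩
    · exact List.mem_flatMap.mpr ⟨w, hwG, (mem_postings founds w _).mpr ⟨(0 + (k:Int), fv), hpE, rfl, hcont⟩⟩
    · rw [pvHits, hcnt]
      exact hov


lemma overlapA_eq (gt : String) (fv : List (String × String)) :
    PySem.Set.len (PySem.Set.inter (PySem.Set.ofList (PySem.Str.split₀ gt))
        (PySem.Set.union (PySem.Set.ofList (PySem.Str.split₀ (PySem.Str.lower (dget fv "title" ""))))
                         (PySem.Set.ofList (PySem.Str.split₀ (pvSumOf fv))))) =
      (((PySem.Set.ofList (PySem.Str.split₀ gt)).countP (fun w => (pvWordsOf fv).contains w) : Nat) : Int) := by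
  have hf : List.filter (fun x => (PySem.Set.union (PySem.Set.ofList (PySem.Str.split₀ (PySem.Str.lower (dget fv "title" ""))))
                         (PySem.Set.ofList (PySem.Str.split₀ (pvSumOf fv)))).contains x) (PySem.Set.ofList (PySem.Str.split₀ gt))
      = List.filter (fun w => (pvWordsOf fv).contains w) (PySem.Set.ofList (PySem.Str.split₀ gt)) := by
    apply List.filter_congr
    intro w _
    rw [Bool.eq_iff_iff]
    constructor
    · intro h
      rw [PySem.Set.contains_iff] at h ⊢
      rw [PySem.Set.mem_union] at h
      rw [pvWordsOf, PySem.Set.mem_union]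
      rcases h with h | h
      · exact Or.inl h
      · exact Or.inr ((PySem.Set.mem_ofList _ _).mp h)
    · intro h
      rw [PySem.Set.contains_iff] at h ⊢
      rw [pvWordsOf, PySem.Set.mem_union] at h
      rw [PySem.Set.mem_union]
      rcases h with h | h
      · exact Or.inl h
      · exact Or.inr ((PySem.Set.mem_ofList _ _).mpr h)
  rw [PySem.Set.len, PySem.Set.inter, hf, List.countP_eq_length_filter]

lemma innerA_iff (gt gid : String) (founds : List (List (String × String))) :
    innerA gt gid founds = true ↔
      ∃ fv ∈ founds,
        ((2:Int) ≤ PySem.Set.len (PySem.Set.inter (PySem.Set.ofList (PySem.Str.split₀ gt))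
            (PySem.Set.union (PySem.Set.ofList (PySem.Str.split₀ (PySem.Str.lower (dget fv "title" ""))))
                             (PySem.Set.ofList (PySem.Str.split₀ (pvSumOf fv))))) ∨
         PySem.Str.isIn gid (pvSumOf fv) = true) := by
  induction founds with
  | nil => simp [innerA]
  | cons fv rest ih =>
    rw [List.exists_mem_cons_iff, ← ih]
    show (if _ then true else innerA gt gid rest) = true ↔ _
    split
    · rename_i h
      simp only [pvSumOf]
      simp only [Bool.or_eq_true, decide_eq_true_eq] at h
      refine iff_of_true trivial (Or.inl ?_)
      exact h
    · rename_i h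
      simp only [pvSumOf]
      simp only [Bool.or_eq_true, decide_eq_true_eq, not_or, decide_eq_true_eq] at h
      constructor
      · intro hr; exact Or.inr hr
      · rintro (hl | hr)
        · rcases hl with hl | hl
          · exact absurd hl (by
              intro hc
              rcases h with ⟨h1, _⟩
              omega)
          · exact absurd hl h.2
        · exact hr

-- B's per-gold condition equals A's inner loop
lemma cond_eq (founds : List (List (String × String))) (gt gid : String) :
    (((PySem.Set.ofList (PySem.Str.split₀ gt)).foldl
        (fun c w => (((pvBuild founds).1.getD w [])).foldl (fun c i => c.modify i 0 (· + 1)) c)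
        PySem.Dict.empty).values.any (fun c => decide ((2:Int) ≤ c))
      || (pvBuild founds).2.any (fun s => PySem.Str.isIn gid s))
    = innerA gt gid founds := by
  rw [foldl_foldl_flatMap (fun w => (pvBuild founds).1.getD w []) (fun (c : PySem.Dict Int Int) (i : Int) => c.modify i 0 (· + 1)) (PySem.Set.ofList (PySem.Str.split₀ gt)) PySem.Dict.empty]
  rw [show (fun w => (pvBuild founds).1.getD w []) = pvPostings founds from funext (pvBuild_fst_getD founds)]
  rw [← PySem.Dict.counter_eq_foldl]
  rw [Bool.eq_iff_iff]
  rw [Bool.or_eq_true, List.any_eq_true, List.any_eq_true, innerA_iff]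
  have hvals : (PySem.Dict.counter ((PySem.Set.ofList (PySem.Str.split₀ gt)).flatMap (pvPostings founds))).values
      = (PySem.Set.ofList ((PySem.Set.ofList (PySem.Str.split₀ gt)).flatMap (pvPostings founds))).map
          (fun k => ((((PySem.Set.ofList (PySem.Str.split₀ gt)).flatMap (pvPostings founds)).count k : Nat) : Int)) := by
    rw [PySem.Dict.values, PySem.Dict.items_counter, List.map_map]
    rfl
  rw [hvals, pvBuild_snd]
  constructor
  · rintro (⟨c, hc, h2⟩ | ⟨s, hs, hin⟩)
    · obtain ⟨i, hiS, rfl⟩ := List.mem_map.mp hc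
      have hiH := (PySem.Set.mem_ofList _ _).mp hiS
      have := (key_iff founds gt).mp ⟨i, hiH, by exact_mod_cast (decide_eq_true_eq.mp h2)⟩
      obtain ⟨fv, hfv, hov⟩ := this
      exact ⟨fv, hfv, Or.inl (by rw [overlapA_eq]; exact hov)⟩
    · obtain ⟨fv, hfv, rfl⟩ := List.mem_map.mp hs
      exact ⟨fv, hfv, Or.inr hin⟩
  · rintro ⟨fv, hfv, hov | hin⟩
    · left
      rw [overlapA_eq] at hov
      obtain ⟨i, hiH, hci⟩ := (key_iff founds gt).mpr ⟨fv, hfv, hov⟩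
      refine ⟨_, List.mem_map.mpr ⟨i, (PySem.Set.mem_ofList _ _).mpr hiH, rfl⟩, ?_⟩
      rw [decide_eq_true_eq]
      exact_mod_cast hci
    · right
      exact ⟨pvSumOf fv, List.mem_map.mpr ⟨fv, hfv, rfl⟩, hin⟩

-- ===== VERDICT (by name: the statement is the Claim_ definition above) =====
theorem judge_detection_spec : Claim_equal_judge_detection := by
  intro found_vulns gold_vulns _
  unfold Spec_judge_detection
  show judge_detection found_vulns gold_vulns = judge_detection_alt found_vulns gold_vulns
  simp only [judge_detection, judge_detection_alt]
  refine (List.foldl_ext _ _ 0 ?_).symm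
  intro d gv _
  rw [cond_eq found_vulns (PySem.Str.lower (dget gv "title" "")) (PySem.Str.lower (dget gv "id" ""))]
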